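-- pv_equiv track=rewrite | github.com/dtybnrj/myminipythonprojects | alpha_numric_value.py | extractMax
-- ===== SOURCE A (Python) =====
-- def extractMax(ss):
--     num,res=0,0
--     for i in range(len(ss)):
--         if ss[i]>='0' and ss[i]<='9':
--             num=num*10+int(int(ss[i])-0)
--         else:
--             res=max(res,num)
--             num=0
--
--     return max(res,num)
-- ===== SOURCE B (Python) =====
-- def extractMax(ss):
--     # tokenize maximal digit runs, then aggregate with max
--     tokens = []
--     i = 0
--     n = len(ss)
--     while i < n:
--         if '0' <= ss[i] <= '9':
--             j = i
--             while j < n and '0' <= ss[j] <= '9':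
--                 j += 1
--             tokens.append(int(ss[i:j]))
--             i = j
--         else:
--             i += 1
--     return max(tokens, default=0)
-- ===== Notes on version B (the rewrite author's own statement) =====
-- stated objective: faster
-- what changed: B tokenizes the string into its maximal digit runs (inner scan + int(slice)) and then takes the max of the parsed tokens with default 0, instead of A's per-character running-accumulator pass.
import Mathlib
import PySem

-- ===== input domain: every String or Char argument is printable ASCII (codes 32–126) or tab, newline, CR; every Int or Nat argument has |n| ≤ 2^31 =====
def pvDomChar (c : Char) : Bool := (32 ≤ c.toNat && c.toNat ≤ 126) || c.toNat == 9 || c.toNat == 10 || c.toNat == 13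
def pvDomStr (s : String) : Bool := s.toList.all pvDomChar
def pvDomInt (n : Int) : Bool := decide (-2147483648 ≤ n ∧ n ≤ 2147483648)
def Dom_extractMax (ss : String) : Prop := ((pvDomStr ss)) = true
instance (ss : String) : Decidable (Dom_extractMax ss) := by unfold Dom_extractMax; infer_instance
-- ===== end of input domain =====

-- B tokenizes the string into its maximal digit runs and takes the max of the parsed tokens
-- (default 0), replacing A's running-accumulator single pass; same return value everywhere.

-- digit test '0' <= c <= '9' (Python single-char string comparison = codepoint comparison)
def pvIsDig (c : Char) : Bool := decide ('0' ≤ c) && decide (c ≤ '9')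

-- int of a single digit char
def pvDigVal (c : Char) : Int := (c.toNat : Int) - 48

-- ===== PORT A =====
-- for i in range(len(ss)): state (num, res); return max(res, num)
def extractMax (ss : String) : Int :=
  let p := ss.toList.foldl
    (fun (p : Int × Int) c =>
      if pvIsDig c then (p.1 * 10 + (pvDigVal c - 0), p.2)
      else (0, max p.2 p.1)) (0, 0)
  max p.2 p.1

-- ===== PORT B =====
-- int(ss[i:j]) on a nonempty digit run
def pvIntOfRun (run : List Char) : Int :=
  run.foldl (fun a c => a * 10 + pvDigVal c) 0

-- tokens: the while-loop of Source B — on a digit, take the maximal run and parse it; else skip one char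
def pvToks : List Char → List Int
  | [] => []
  | c :: cs =>
    if h : pvIsDig c then
      pvIntOfRun ((c :: cs).takeWhile pvIsDig) :: pvToks ((c :: cs).dropWhile pvIsDig)
    else pvToks cs
termination_by cs => cs.length
decreasing_by
  · simp only [List.dropWhile, h]
    exact Nat.lt_succ_of_le (List.length_dropWhile_le _ _)
  · simp

def extractMax_alt (ss : String) : Int :=
  (PySem.List.max? (pvToks ss.toList) (fun x => x)).getD 0

-- ===== PRECONDITION & SPEC =====
def Spec_extractMax (ss : String) (out : Int) : Prop := out = extractMax_alt ss
instance (ss : String) (out : Int) : Decidable (Spec_extractMax ss out) := by unfold Spec_extractMax; infer_instance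

-- ===== CLAIM (what is proved, stated in full; the proofs are below) =====
def Claim_equal_extractMax : Prop := ∀ (ss : String), Dom_extractMax ss → Spec_extractMax ss (extractMax ss)

-- ===== LEMMAS AND PROOFS =====

-- proof-side accumulator form of the tokenizer
def pvToksAux : List Char → Option Int → List Int
  | [], none => []
  | [], some v => [v]
  | c :: cs, cur =>
    if pvIsDig c then pvToksAux cs (some ((cur.getD 0) * 10 + pvDigVal c))
    else match cur with
      | none => pvToksAux cs none
      | some v => v :: pvToksAux cs none

theorem pvDigVal_nonneg {c : Char} (h : pvIsDig c = true) : 0 ≤ pvDigVal c := by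
  unfold pvIsDig at h
  simp only [Bool.and_eq_true, decide_eq_true_eq] at h
  have h48 : (48 : Nat) ≤ c.toNat := h.1
  unfold pvDigVal
  omega

theorem pvToksAux_some (cs : List Char) : ∀ a : Int,
    pvToksAux cs (some a)
      = (cs.takeWhile pvIsDig).foldl (fun b c => b * 10 + pvDigVal c) a
        :: pvToksAux (cs.dropWhile pvIsDig) none := by
  induction cs with
  | nil => intro a; simp [pvToksAux]
  | cons c cs ih =>
    intro a
    by_cases h : pvIsDig c = true
    · simp [pvToksAux, h, List.takeWhile, List.dropWhile, ih]
    · simp [pvToksAux, h, List.takeWhile, List.dropWhile]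

theorem pvToks_eq_aux : ∀ cs : List Char, pvToks cs = pvToksAux cs none := by
  intro cs
  induction hn : cs.length using Nat.strong_induction_on generalizing cs with
  | _ n ih =>
    cases cs with
    | nil => simp [pvToks, pvToksAux]
    | cons c cs =>
      by_cases h : pvIsDig c = true
      · rw [pvToks, dif_pos h, pvToksAux, if_pos h, pvToksAux_some]
        simp only [List.takeWhile, List.dropWhile, h, pvIntOfRun, List.foldl_cons,
          Option.getD]
        subst hn
        rw [ih (List.dropWhile pvIsDig cs).length
          (Nat.lt_succ_of_le (List.length_dropWhile_le pvIsDig cs)) _ rfl]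
      · rw [pvToks, dif_neg (by simp [h]), pvToksAux, if_neg (by simp [h])]
        subst hn
        exact ih _ (by simp) _ rfl

-- starting from accumulator 0 only adds a 0 token, harmless under a nonnegative seed
theorem pvZero (cs : List Char) : ∀ res : Int, 0 ≤ res →
    (pvToksAux cs (some 0)).foldl max res = (pvToksAux cs none).foldl max res := by
  induction cs with
  | nil => intro res h; simp [pvToksAux]; omega
  | cons c cs ih =>
    intro res h
    by_cases hd : pvIsDig c = true
    · simp [pvToksAux, hd]
    · simp only [pvToksAux, hd, if_false, Bool.false_eq_true, List.foldl_cons]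
      rw [show max res 0 = res by omega]

-- A's loop, with state (num, res), equals folding max over the tokens started at accumulator num
theorem pvMain (cs : List Char) : ∀ num res : Int, 0 ≤ num → 0 ≤ res →
    max (cs.foldl
      (fun (p : Int × Int) c =>
        if pvIsDig c then (p.1 * 10 + (pvDigVal c - 0), p.2)
        else (0, max p.2 p.1)) (num, res)).2
      (cs.foldl
      (fun (p : Int × Int) c =>
        if pvIsDig c then (p.1 * 10 + (pvDigVal c - 0), p.2)
        else (0, max p.2 p.1)) (num, res)).1
      = (pvToksAux cs (some num)).foldl max res := by
  induction cs with
  | nil => intro num res _ _; simp [pvToksAux]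
  | cons c cs ih =>
    intro num res hnum hres
    by_cases h : pvIsDig c = true
    · simp only [List.foldl_cons, h, if_true, pvToksAux, Option.getD]
      rw [sub_zero]
      have hd := pvDigVal_nonneg h
      exact ih _ _ (by nlinarith) hres
    · simp only [List.foldl_cons, h, if_false, pvToksAux, Bool.false_eq_true]
      rw [← pvZero cs (max res num) (by omega)]
      exact ih 0 (max res num) le_rfl (by omega)

-- max(tokens, default=0) is the running-max fold from 0 when all tokens are nonnegative
theorem pvMaxD (l : List Int) (h : ∀ x ∈ l, 0 ≤ x) :
    (PySem.List.max? l (fun x => x)).getD 0 = l.foldl max 0 := by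
  cases l with
  | nil => simp [PySem.List.max?]
  | cons x t =>
    rw [PySem.List.max?_id_cons]
    simp only [Option.getD, List.foldl_cons]
    have hx : 0 ≤ x := h x (by simp)
    rw [show max (0 : Int) x = x by omega]

theorem pvToksAux_nonneg (cs : List Char) : ∀ cur : Option Int,
    (∀ a, cur = some a → 0 ≤ a) → ∀ x ∈ pvToksAux cs cur, 0 ≤ x := by
  induction cs with
  | nil =>
    intro cur hcur x hx
    cases cur with
    | none => simp [pvToksAux] at hx
    | some v => simp [pvToksAux] at hx; subst hx; exact hcur _ rfl
  | cons c cs ih =>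
    intro cur hcur x hx
    by_cases hd : pvIsDig c = true
    · have hdv := pvDigVal_nonneg hd
      refine ih (some ((cur.getD 0) * 10 + pvDigVal c)) ?_ x ?_
      · intro a ha
        injection ha with ha; subst ha
        have h0 : (0:Int) ≤ cur.getD 0 := by
          cases cur with
          | none => simp
          | some v => simpa using hcur v rfl
        nlinarith
      · simpa [pvToksAux, hd] using hx
    · cases cur with
      | none =>
        refine ih none (by simp) x ?_
        simpa [pvToksAux, hd] using hx
      | some v =>
        simp only [pvToksAux, hd, if_false, Bool.false_eq_true, List.mem_cons] at hx
        cases hx with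
        | inl h => subst h; exact hcur _ rfl
        | inr h => exact ih none (by simp) x h

-- ===== VERDICT (by name: the statement is the Claim_ definition above) =====
theorem extractMax_spec : Claim_equal_extractMax := by
  intro ss _
  unfold Spec_extractMax extractMax extractMax_alt
  rw [pvToks_eq_aux, pvMaxD _ (pvToksAux_nonneg _ none (by simp)),
    ← pvZero _ 0 le_rfl]
  exact pvMain ss.toList 0 0 le_rfl le_rfl
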